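-- pv_equiv track=rewrite | github.com/MelihYanalak/Implementation-of-Top-Algorithms-in-Python | Examples_3/algorithms_in_python_3.py | minOperation
-- ===== SOURCE A (Python) =====
-- def minOperation(arr):
--     operation = [0]
--     opNum = 0
--     while (len(arr)>0):
--         temp = findAndDeleteMin(arr)
--         operation.insert(len(operation),operation[len(operation)-1]+temp)
--     for i in range(0,len(operation)):
--         opNum = opNum + operation[i]
--     return [opNum,operation[len(operation)-1]]
--
-- def findAndDeleteMin(arr):
--     min = [0,arr[0]]
--     for i in range(1,len(arr)):
--         if arr[i]< min[1] :
--             min = [i,arr[i]]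
--     arr.pop(min[0])
--     return (min[1])
-- ===== SOURCE B (Python) =====
-- def minOperation(arr):
--     total = 0
--     opNum = 0
--     for x in sorted(arr):
--         total += x
--         opNum += total
--     return [opNum, total]
-- ===== Notes on version B (the rewrite author's own statement) =====
-- stated objective: faster
-- what changed: Instead of repeatedly scanning for and deleting the minimum and keeping the whole prefix-sum list, B sorts the array once and accumulates the running total and the sum of running totals in a single pass (note: A empties the input list in place, B does not mutate it; the equivalence is about the return value).
import Mathlib
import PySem

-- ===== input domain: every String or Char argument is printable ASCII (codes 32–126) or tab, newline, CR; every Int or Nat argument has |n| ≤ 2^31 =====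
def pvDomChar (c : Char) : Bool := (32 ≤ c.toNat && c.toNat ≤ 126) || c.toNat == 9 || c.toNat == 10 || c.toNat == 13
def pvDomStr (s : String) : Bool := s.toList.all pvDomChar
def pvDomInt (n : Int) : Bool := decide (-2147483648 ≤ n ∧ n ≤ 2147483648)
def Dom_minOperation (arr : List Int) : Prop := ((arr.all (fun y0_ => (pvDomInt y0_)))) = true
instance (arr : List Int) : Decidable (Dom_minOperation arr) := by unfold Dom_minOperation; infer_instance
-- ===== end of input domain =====

-- B replaces A's quadratic repeated find-and-delete-minimum with one sort and a single
-- accumulating pass (objective: faster). A empties its argument list in place; B does not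
-- mutate it — the equivalence proved here is about the return value only.

-- ===== PORT A =====

-- the body of `for i in range(1, len(arr))` in findAndDeleteMin
def fadmStep (arr : List Int) (mn : Int × Int) (i : Int) : Int × Int :=
  if PySem.List.pyGetD arr i 0 < mn.2 then (i, PySem.List.pyGetD arr i 0) else mn

-- invariant of the index-scanning fold (the port's termination proof cites fadm_len below)
lemma fadm_inv (arr : List Int) (n : Nat) (h1 : 1 ≤ n) (hn : n ≤ arr.length) :
    ∃ k : Nat, ((PySem.List.pyRange 1 (n : Int) 1).foldl (fadmStep arr)
        (0, PySem.List.pyGetD arr 0 0)) = ((k : Int), PySem.List.pyGetD arr (k : Int) 0) ∧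
      k < n ∧ ∀ j : Nat, j < n → PySem.List.pyGetD arr (k : Int) 0 ≤ PySem.List.pyGetD arr (j : Int) 0 := by
  induction n with
  | zero => omega
  | succ m ih =>
    rcases Nat.eq_or_lt_of_le h1 with h | h
    · have hm : m = 0 := by omega
      subst hm
      refine ⟨0, ?_, by omega, ?_⟩
      · simp [PySem.List.pyRange_one_eq_nil (by omega : (1:Int) ≤ 1)]
      · intro j hj; interval_cases j; exact le_refl _
    · have hm1 : 1 ≤ m := by omega
      obtain ⟨k, hk, hklt, hkmin⟩ := ih hm1 (by omega)
      have hsplit : PySem.List.pyRange 1 ((m : Int) + 1) 1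
          = PySem.List.pyRange 1 (m : Int) 1 ++ [(m : Int)] :=
        PySem.List.pyRange_one_succ_right (by exact_mod_cast hm1)
      have hcast : ((m + 1 : Nat) : Int) = (m : Int) + 1 := by push_cast; ring
      rw [hcast, hsplit, List.foldl_append, hk]
      by_cases hlt : PySem.List.pyGetD arr (m : Int) 0 < PySem.List.pyGetD arr (k : Int) 0
      · refine ⟨m, ?_, by omega, ?_⟩
        · simp only [List.foldl_cons, List.foldl_nil, fadmStep, if_pos hlt]
        · intro j hj
          rcases Nat.lt_succ_iff_lt_or_eq.mp hj with hj' | hj'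
          · exact le_trans (le_of_lt hlt) (hkmin j hj')
          · subst hj'; exact le_refl _
      · refine ⟨k, ?_, by omega, ?_⟩
        · simp only [List.foldl_cons, List.foldl_nil, fadmStep, if_neg hlt]
        · intro j hj
          rcases Nat.lt_succ_iff_lt_or_eq.mp hj with hj' | hj'
          · exact hkmin j hj'
          · subst hj'; omega

def findAndDeleteMin (arr : List Int) : Int × List Int :=
  let mn : Int × Int :=
    (PySem.List.pyRange 1 (arr.length : Int) 1).foldl (fadmStep arr)
      (0, PySem.List.pyGetD arr 0 0)
  (mn.2, ((PySem.List.pop? arr mn.1).getD (0, [])).2)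

lemma fadm_spec (arr : List Int) (harr : arr ≠ []) :
    ∃ k : Nat, ∃ hk : k < arr.length,
      findAndDeleteMin arr = (arr[k], arr.eraseIdx k) ∧ ∀ y ∈ arr, arr[k] ≤ y := by
  have hlen : 1 ≤ arr.length := List.length_pos_iff.mpr harr
  obtain ⟨k, hk, hklt, hkmin⟩ := fadm_inv arr arr.length hlen (le_refl _)
  have hget : PySem.List.pyGetD arr (k : Int) 0 = arr[k] := by
    simp [PySem.List.pyGetD, List.getElem?_eq_getElem hklt]
  refine ⟨k, hklt, ?_, ?_⟩
  · have hpop : PySem.List.pop? arr (k : Int) = some (arr[k], arr.eraseIdx k) :=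
      PySem.List.pop?_natCast arr k hklt
    simp [findAndDeleteMin, hk, hget, hpop]

  · intro y hy
    obtain ⟨j, hj, rfl⟩ := List.mem_iff_getElem.mp hy
    have := hkmin j hj
    rw [hget] at this
    simpa [PySem.List.pyGetD, List.getElem?_eq_getElem hj] using this

lemma fadm_len (arr : List Int) (harr : arr ≠ []) :
    (findAndDeleteMin arr).2.length < arr.length := by
  obtain ⟨k, hk, heq, -⟩ := fadm_spec arr harr
  rw [heq]
  simp [List.length_eraseIdx, hk]
  omega

-- the `while len(arr) > 0` loop of minOperation (state: arr, operation)
def minOpLoop (arr : List Int) (operation : List Int) : List Int :=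
  if h : arr.length > 0 then
    minOpLoop (findAndDeleteMin arr).2
      (PySem.List.insert operation (PySem.List.len operation)
        (PySem.List.pyGetD operation (PySem.List.len operation - 1) 0 + (findAndDeleteMin arr).1))
  else operation
termination_by arr.length
decreasing_by exact fadm_len arr (List.length_pos_iff.mp h)

def minOperation (arr : List Int) : List Int :=
  let operation := minOpLoop arr [0]
  let opNum := (PySem.List.pyRange 0 (PySem.List.len operation) 1).foldl
      (fun acc i => acc + PySem.List.pyGetD operation i 0) 0
  [opNum, PySem.List.pyGetD operation (PySem.List.len operation - 1) 0]

-- ===== PORT B =====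
def minOperation_alt (arr : List Int) : List Int :=
  let r := (PySem.List.sorted arr (fun x => x) false).foldl
      (fun (p : Int × Int) x => (p.1 + x, p.2 + (p.1 + x))) (0, 0)
  [r.2, r.1]

-- ===== PRECONDITION & SPEC =====
def Spec_minOperation (arr : List Int) (out : List Int) : Prop := out = minOperation_alt arr
instance (arr : List Int) (out : List Int) : Decidable (Spec_minOperation arr out) := by unfold Spec_minOperation; infer_instance

-- ===== CLAIM (what is proved, stated in full; the proofs are below) =====
def Claim_equal_minOperation : Prop := ∀ (arr : List Int), Dom_minOperation arr → Spec_minOperation arr (minOperation arr)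

-- ===== LEMMAS AND PROOFS =====

-- the sequence of values A's while-loop extracts from arr
def extract (arr : List Int) : List Int :=
  if h : arr.length > 0 then
    (findAndDeleteMin arr).1 :: extract (findAndDeleteMin arr).2
  else []
termination_by arr.length
decreasing_by exact fadm_len arr (List.length_pos_iff.mp h)

-- running prefix sums starting from t (the tail of A's operation list)
def scanT (t : Int) : List Int → List Int
  | [] => []
  | x :: l => (t + x) :: scanT (t + x) l

lemma cons_eraseIdx_perm (l : List Int) (k : Nat) (h : k < l.length) :
    (l[k] :: l.eraseIdx k).Perm l := by
  conv_rhs => rw [← List.take_append_drop k l]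
  rw [List.eraseIdx_eq_take_drop_succ, List.drop_eq_getElem_cons h]
  exact List.perm_middle.symm

lemma extract_aux (n : Nat) : ∀ arr : List Int, arr.length ≤ n →
    (extract arr).Perm arr ∧ (extract arr).Pairwise (· ≤ ·) := by
  induction n with
  | zero =>
    intro arr hlen
    have : arr = [] := List.length_eq_zero_iff.mp (by omega)
    subst this
    rw [extract, dif_neg (by simp)]
    exact ⟨List.Perm.refl _, List.Pairwise.nil⟩
  | succ m ih =>
    intro arr hlen
    by_cases h : arr.length > 0
    · have harr : arr ≠ [] := List.length_pos_iff.mp h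
      obtain ⟨k, hk, heq, hmin⟩ := fadm_spec arr harr
      have hlt := fadm_len arr harr
      have hrec := ih (findAndDeleteMin arr).2 (by omega)
      rw [extract, dif_pos h]
      constructor
      · refine List.Perm.trans (List.Perm.cons _ hrec.1) ?_
        rw [heq]
        exact cons_eraseIdx_perm arr k hk
      · refine List.pairwise_cons.mpr ⟨?_, hrec.2⟩
        intro y hy
        have hy' : y ∈ (findAndDeleteMin arr).2 := hrec.1.mem_iff.mp hy
        rw [heq] at hy' ⊢
        exact hmin y (List.mem_of_mem_eraseIdx hy')
    · rw [extract, dif_neg h]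
      have : arr = [] := List.length_eq_zero_iff.mp (by omega)
      subst this
      exact ⟨List.Perm.refl _, List.Pairwise.nil⟩

lemma sorted_eq_extract (arr : List Int) :
    PySem.List.sorted arr (fun x => x) false = extract arr :=
  PySem.List.sorted_id_eq_of_perm_of_pairwise arr (extract arr)
    ((extract_aux arr.length arr le_rfl).1) ((extract_aux arr.length arr le_rfl).2)

-- operation[len(operation)-1] on a nonempty list is its last element
lemma last_getD (op : List Int) (g : Int) :
    PySem.List.pyGetD (op ++ [g]) (PySem.List.len (op ++ [g]) - 1) 0 = g := by
  have h : PySem.List.len (op ++ [g]) - 1 = (op.length : Int) := by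
    simp [PySem.List.len]
  rw [h]
  simp [PySem.List.pyGetD]

-- A's while-loop appends the running prefix sums of the extracted values
lemma minOpLoop_spec (n : Nat) : ∀ arr : List Int, arr.length ≤ n → ∀ (op : List Int) (g : Int),
    minOpLoop arr (op ++ [g]) = (op ++ [g]) ++ scanT g (extract arr) := by
  induction n with
  | zero =>
    intro arr hlen op g
    have : arr = [] := List.length_eq_zero_iff.mp (by omega)
    subst this
    rw [minOpLoop, dif_neg (by simp), extract, dif_neg (by simp)]
    simp [scanT]
  | succ m ih =>
    intro arr hlen op g
    by_cases h : arr.length > 0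
    · have harr : arr ≠ [] := List.length_pos_iff.mp h
      have hr := fadm_len arr harr
      rw [minOpLoop, dif_pos h, extract, dif_pos h]
      rw [last_getD, PySem.List.insert_len]
      rw [ih (findAndDeleteMin arr).2 (by omega) (op ++ [g]) (g + (findAndDeleteMin arr).1)]
      simp [scanT]
    · have : arr = [] := List.length_eq_zero_iff.mp (by omega)
      subst this
      rw [minOpLoop, dif_neg (by simp), extract, dif_neg (by simp)]
      simp [scanT]

-- the last prefix sum is t plus the total
lemma scanT_last (l : List Int) : ∀ t : Int, ∃ pre : List Int, t :: scanT t l = pre ++ [t + l.sum] := by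
  induction l with
  | nil => intro t; exact ⟨[], by simp [scanT]⟩
  | cons x l ih =>
    intro t
    obtain ⟨pre, hpre⟩ := ih (t + x)
    exact ⟨t :: pre, by simp [scanT, hpre, add_assoc]⟩

-- B's fold computes the total and the sum of the prefix sums
lemma foldB_spec (l : List Int) : ∀ t o : Int,
    l.foldl (fun (p : Int × Int) x => (p.1 + x, p.2 + (p.1 + x))) (t, o)
      = (t + l.sum, o + (scanT t l).sum) := by
  induction l with
  | nil => intro t o; simp [scanT]
  | cons x l ih =>
    intro t o
    simp only [List.foldl_cons, scanT, List.sum_cons]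
    rw [ih]
    refine Prod.ext ?_ ?_ <;> simp <;> ring

-- the final summation for-loop sums the operation list
lemma sum_loop (op : List Int) :
    (PySem.List.pyRange 0 (PySem.List.len op) 1).foldl
      (fun acc i => acc + PySem.List.pyGetD op i 0) 0 = op.sum := by
  have h : PySem.List.len op = ((op.length : Nat) : Int) := by simp [PySem.List.len]
  rw [h, PySem.List.foldl_pyRange_zero_pyGetD' op 0 (fun acc v => acc + v) 0]
  induction op using List.reverseRecOn with
  | nil => simp
  | append_singleton l x ih => simp [ih]

-- ===== VERDICT (by name: the statement is the Claim_ definition above) =====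
theorem minOperation_spec : Claim_equal_minOperation := by
  intro arr _
  show minOperation arr = minOperation_alt arr
  unfold minOperation minOperation_alt
  dsimp only
  rw [sorted_eq_extract, foldB_spec]
  have hloop := minOpLoop_spec arr.length arr le_rfl [] 0
  simp only [List.nil_append] at hloop
  rw [hloop]
  obtain ⟨pre, hpre⟩ := scanT_last (extract arr) 0
  have hop : [(0:Int)] ++ scanT 0 (extract arr) = pre ++ [0 + (extract arr).sum] := by
    simpa using hpre
  rw [hop, sum_loop, last_getD]
  rw [← hpre]
  simp
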